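-- pv_equiv track=rewrite | github.com/tongsun99/algorithm-code | acwing算法基础课/第一讲-基础算法/793高精度乘法.py | big_mul
-- ===== SOURCE A (Python) =====
-- def big_mul(a_list, b):
--     c_list = []
--     t = 0; i = 0
--     while i < len(a_list):
--         if i < len(a_list): t += a_list[i] * b
--         c_list.append(t % 10)
--         t = t // 10
--         i += 1
--     c_list.append(t)
--
--     # 去除前导0
--     while (len(c_list) > 1 and c_list[-1] == 0): c_list.pop()
--     return c_list
-- ===== SOURCE B (Python) =====
-- def big_mul(a_list, b):
--     # Convert digit list to one integer (Horner), multiply once, extract digits.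
--     value = 0
--     for d in reversed(a_list):
--         value = value * 10 + d
--     p = value * b
--     n = len(a_list)
--     c_list = [(p // 10 ** j) % 10 for j in range(n)]
--     c_list.append(p // 10 ** n)
--     while len(c_list) > 1 and c_list[-1] == 0:
--         c_list.pop()
--     return c_list
-- ===== Notes on version B (the rewrite author's own statement) =====
-- stated objective: alternative
-- what changed: Replaces A's digit-by-digit multiply-with-carry loop by converting the list to a single integer via Horner's rule, multiplying once, and extracting each output digit with a closed-form floor-division comprehension (p // 10**j % 10) plus the residual quotient.
import Mathlib
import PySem

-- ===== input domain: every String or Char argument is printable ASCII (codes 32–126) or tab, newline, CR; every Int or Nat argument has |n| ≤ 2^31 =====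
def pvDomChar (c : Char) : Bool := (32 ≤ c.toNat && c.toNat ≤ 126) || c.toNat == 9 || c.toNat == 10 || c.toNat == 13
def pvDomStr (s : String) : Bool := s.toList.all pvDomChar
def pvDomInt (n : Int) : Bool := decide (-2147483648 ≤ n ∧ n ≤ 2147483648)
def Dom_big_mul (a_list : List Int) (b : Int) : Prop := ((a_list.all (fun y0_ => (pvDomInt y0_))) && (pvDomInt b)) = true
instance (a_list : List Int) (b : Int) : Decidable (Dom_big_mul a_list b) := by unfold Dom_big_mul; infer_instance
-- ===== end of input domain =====

-- B converts the digit list to one integer (Horner), multiplies once, and extracts the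
-- output digits by closed-form floor division — an alternative to A's carry loop (not faster).

-- ===== PORT A =====
-- A's while loop: i runs 0..len-1 so the inner 'if i < len(a_list)' guard is always true;
-- transliterated by consuming the list, carrying the state (t, c_list).
def bigMulLoop (b : Int) : List Int → Int → List Int → List Int × Int
  | [], t, c => (c, t)
  | a :: rest, t, c =>
      bigMulLoop b rest (PySem.Int.floordiv (t + a * b) 10)
        (c ++ [PySem.Int.mod (t + a * b) 10])

-- 'while len(c_list) > 1 and c_list[-1] == 0: c_list.pop()'
-- (c[-1] of a list with len > 1 is its last element)
def stripTrailing (c : List Int) : List Int :=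
  if _h : c.length > 1 ∧ c.getLast? = some 0 then stripTrailing c.dropLast else c
termination_by c.length
decreasing_by simp [List.length_dropLast]; omega

def big_mul (a_list : List Int) (b : Int) : List Int :=
  let r := bigMulLoop b a_list 0 []
  stripTrailing (r.1 ++ [r.2])

-- ===== PORT B =====
-- 'for j in range(n)' over the nonnegative indices 0..n-1 is List.range n; '10 ** j' with
-- j ≥ 0 is (10 : Int) ^ j — exact on this domain.
def big_mul_alt (a_list : List Int) (b : Int) : List Int :=
  let value := a_list.reverse.foldl (fun v d => v * 10 + d) 0
  let p := value * b
  let n := a_list.length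
  let c := (List.range n).map (fun j => PySem.Int.mod (PySem.Int.floordiv p ((10 : Int) ^ j)) 10)
  stripTrailing (c ++ [PySem.Int.floordiv p ((10 : Int) ^ n)])

-- ===== PRECONDITION & SPEC =====
def Spec_big_mul (a_list : List Int) (b : Int) (out : List Int) : Prop := out = big_mul_alt a_list b
instance (a_list : List Int) (b : Int) (out : List Int) : Decidable (Spec_big_mul a_list b out) := by unfold Spec_big_mul; infer_instance

-- ===== CLAIM (what is proved, stated in full; the proofs are below) =====
def Claim_equal_big_mul : Prop := ∀ (a_list : List Int) (b : Int), Dom_big_mul a_list b → Spec_big_mul a_list b (big_mul a_list b)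

-- ===== LEMMAS AND PROOFS =====

-- value of a little-endian digit list
def dval (l : List Int) : Int := l.foldr (fun d v => v * 10 + d) 0

theorem mod_shift (t s : Int) : PySem.Int.mod (t + 10 * s) 10 = PySem.Int.mod t 10 := by
  rw [PySem.Int.mod_eq_emod_of_pos (by norm_num : (0:Int) < 10), PySem.Int.mod_eq_emod_of_pos (by norm_num : (0:Int) < 10)]
  omega

theorem fdiv_shift (t s : Int) : PySem.Int.floordiv (t + 10 * s) 10 = PySem.Int.floordiv t 10 + s := by
  rw [PySem.Int.floordiv_eq_ediv_of_pos (by norm_num : (0:Int) < 10), PySem.Int.floordiv_eq_ediv_of_pos (by norm_num : (0:Int) < 10)]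
  omega

theorem fdiv_pow_succ (x : Int) (j : Nat) :
    PySem.Int.floordiv x ((10 : Int) ^ (j + 1)) =
      PySem.Int.floordiv (PySem.Int.floordiv x 10) ((10 : Int) ^ j) := by
  rw [PySem.Int.floordiv_eq_ediv_of_pos (by positivity),
      PySem.Int.floordiv_eq_ediv_of_pos (by norm_num : (0:Int) < 10),
      PySem.Int.floordiv_eq_ediv_of_pos (by positivity),
      pow_succ']
  exact (Int.ediv_ediv_of_nonneg (by norm_num : (0:Int) ≤ 10)).symm

theorem fdiv_one (x : Int) : PySem.Int.floordiv x 1 = x := by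
  rw [PySem.Int.floordiv_eq_ediv_of_pos (by norm_num : (0:Int) < 1)]; exact Int.ediv_one x

theorem bigMulLoop_eq (b : Int) (l : List Int) : ∀ (t : Int) (c : List Int),
    bigMulLoop b l t c =
      (c ++ (List.range l.length).map
          (fun j => PySem.Int.mod (PySem.Int.floordiv (t + b * dval l) ((10 : Int) ^ j)) 10),
        PySem.Int.floordiv (t + b * dval l) ((10 : Int) ^ l.length)) := by
  induction l with
  | nil =>
      intro t c
      simp [bigMulLoop, dval]
  | cons a rest ih =>
      intro t c
      have hW : t + b * dval (a :: rest) = (t + a * b) + 10 * (b * dval rest) := by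
        simp only [dval, List.foldr_cons]; ring
      simp only [bigMulLoop, ih, List.length_cons, List.range_succ_eq_map, List.map_cons,
        List.map_map, hW, Prod.mk.injEq]
      constructor
      · simp only [List.append_assoc, List.singleton_append]
        congr 1
        congr 1
        · rw [pow_zero, fdiv_one, mod_shift]
        · apply List.map_congr_left
          intro j _
          simp only [Function.comp_apply]
          rw [fdiv_pow_succ, fdiv_shift]
      · rw [fdiv_pow_succ, fdiv_shift]

theorem horner_eq_dval (l : List Int) :
    l.reverse.foldl (fun v d => v * 10 + d) 0 = dval l := by
  rw [List.foldl_reverse]; rfl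

theorem big_mul_spec_aux (a_list : List Int) (b : Int) :
    big_mul a_list b = big_mul_alt a_list b := by
  unfold big_mul big_mul_alt
  rw [bigMulLoop_eq, horner_eq_dval]
  have hc : 0 + b * dval a_list = dval a_list * b := by ring
  simp only [hc, List.nil_append]

-- ===== VERDICT (by name: the statement is the Claim_ definition above) =====
theorem big_mul_spec : Claim_equal_big_mul := by
  intro a_list b _
  exact big_mul_spec_aux a_list b
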